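-- pv_equiv track=rewrite | github.com/kuang1987/findingitems-backend | findingitems/baidu/aip_nlp.py | abstract_v1
-- ===== SOURCE A (Python) =====
-- def abstract_v1(dep_result):
--     item_part = []
--     loc_part = []
--     is_hed = False
--     # item = []
--     # loc = []
--
--     for i in dep_result:
--         if i['deprel'] == 'HED':
--             is_hed = True
--             continue
--
--         if is_hed:
--             loc_part.append(i)
--         else:
--             item_part.append(i)
--
--
--     # for i in item_part:
--     #     if (i['postag'] in ITEM_POSTAG_LIST) or (i['postag'] in DE_POSTAG_LIST and i['deprel'] == 'DE'):
--     #         item.append(i)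
--     #
--     # for i in loc_part:
--     #     if (i['postag'] in ITEM_POSTAG_LIST) or (i['postag'] in DE_POSTAG_LIST and i['deprel'] == 'DE'):
--     #         loc.append(i)
--
--     final_item = ('').join([ w['word'] for w in item_part])
--     final_loc = ('').join([ w['word'] for w in loc_part])
--
--     return final_item, final_loc
-- ===== SOURCE B (Python) =====
-- def abstract_v1(dep_result):
--     idx = next((i for i, t in enumerate(dep_result) if t['deprel'] == 'HED'), None)
--     if idx is None:
--         return ''.join(t['word'] for t in dep_result), ''
--     item = ''.join(t['word'] for t in dep_result[:idx])
--     loc = ''.join(t['word'] for t in dep_result[idx + 1:] if t['deprel'] != 'HED')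
--     return item, loc
-- ===== Notes on version B (the rewrite author's own statement) =====
-- stated objective: simpler
-- what changed: Replaces the single flag-toggling accumulator loop with locating the first HED index and joining two slices (prefix, and HED-filtered suffix) directly.
import Mathlib
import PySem

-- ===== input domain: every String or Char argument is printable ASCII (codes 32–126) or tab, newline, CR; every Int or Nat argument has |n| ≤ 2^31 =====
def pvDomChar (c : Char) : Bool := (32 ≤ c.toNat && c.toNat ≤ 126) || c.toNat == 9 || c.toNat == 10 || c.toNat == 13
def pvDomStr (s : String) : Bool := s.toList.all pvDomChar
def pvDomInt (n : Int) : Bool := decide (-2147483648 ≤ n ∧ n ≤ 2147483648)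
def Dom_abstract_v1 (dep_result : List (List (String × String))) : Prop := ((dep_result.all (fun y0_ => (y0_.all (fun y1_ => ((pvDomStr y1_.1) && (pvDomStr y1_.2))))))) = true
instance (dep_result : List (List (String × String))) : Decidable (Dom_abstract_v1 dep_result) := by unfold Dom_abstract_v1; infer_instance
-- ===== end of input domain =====

-- B locates the first 'HED' token and joins two slices instead of A's flag-toggling accumulator loop; objective: simpler.

-- d[k] for the token dicts; exact under Pre_ (the key is present there)
def dget (d : List (String × String)) (k : String) : String :=
  ((PySem.Dict.mk d).get? k).getD ""

-- ===== PORT A =====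
-- the for-loop over dep_result with state (item_part, loc_part, is_hed)
def abstractLoopA : List (List (String × String)) → Bool →
    List (List (String × String)) × List (List (String × String))
  | [], _ => ([], [])
  | i :: rest, is_hed =>
    if dget i "deprel" == "HED" then abstractLoopA rest true
    else
      let r := abstractLoopA rest is_hed
      if is_hed then (r.1, i :: r.2) else (i :: r.1, r.2)

def abstract_v1 (dep_result : List (List (String × String))) : String × String :=
  let parts := abstractLoopA dep_result false
  (PySem.Str.join "" (parts.1.map (fun w => dget w "word")),
   PySem.Str.join "" (parts.2.map (fun w => dget w "word")))

-- ===== PORT B =====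
def abstract_v1_alt (dep_result : List (List (String × String))) : String × String :=
  match dep_result.findIdx? (fun t => dget t "deprel" == "HED") with
  | none => (PySem.Str.join "" (dep_result.map (fun t => dget t "word")), "")
  | some i =>
      (PySem.Str.join "" ((dep_result.take i).map (fun t => dget t "word")),
       PySem.Str.join "" (((dep_result.drop (i + 1)).filter
          (fun t => !(dget t "deprel" == "HED"))).map (fun t => dget t "word")))

-- ===== PRECONDITION & SPEC =====
-- Pre_ excludes exactly the KeyError inputs: every token must have a 'deprel' entry,
-- and every non-HED token must also have a 'word' entry (A never reads 'word' of a HED token).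
def Pre_abstract_v1 (dep_result : List (List (String × String))) : Prop :=
  (dep_result.all (fun t =>
    ((PySem.Dict.mk t).get? "deprel").isSome &&
    (((PySem.Dict.mk t).get? "deprel" == some "HED") ||
      ((PySem.Dict.mk t).get? "word").isSome))) = true

instance (dep_result : List (List (String × String))) : Decidable (Pre_abstract_v1 dep_result) := by
  unfold Pre_abstract_v1; infer_instance

def pvWitness_abstract_v1 : (List (List (String × String))) :=
  [[("deprel", "SBV"), ("word", "a")], [("deprel", "HED"), ("word", "x")],
   [("deprel", "VOB"), ("word", "b")]]

def Spec_abstract_v1 (dep_result : List (List (String × String))) (out : String × String) : Prop := out = abstract_v1_alt dep_result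
instance (dep_result : List (List (String × String))) (out : String × String) : Decidable (Spec_abstract_v1 dep_result out) := by unfold Spec_abstract_v1; infer_instance

-- ===== CLAIM (what is proved, stated in full; the proofs are below) =====
def Claim_equal_abstract_v1 : Prop := ∀ (dep_result : List (List (String × String))), Dom_abstract_v1 dep_result → Pre_abstract_v1 dep_result → Spec_abstract_v1 dep_result (abstract_v1 dep_result)

-- ===== LEMMAS AND PROOFS =====

-- once the flag is set, nothing goes to item_part and exactly the non-HED tokens go to loc_part
theorem abstractLoopA_true (dep : List (List (String × String))) :
    abstractLoopA dep true = ([], dep.filter (fun t => !(dget t "deprel" == "HED"))) := by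
  induction dep with
  | nil => rfl
  | cons i rest ih =>
    by_cases h : (dget i "deprel" == "HED") = true
    · simp [abstractLoopA, h, ih]
    · simp [abstractLoopA, h, ih]

-- the flag loop computes the slices B takes around the first HED token
theorem abstractLoopA_false (dep : List (List (String × String))) :
    abstractLoopA dep false =
      match dep.findIdx? (fun t => dget t "deprel" == "HED") with
      | none => (dep, [])
      | some i => (dep.take i,
          (dep.drop (i + 1)).filter (fun t => !(dget t "deprel" == "HED"))) := by
  induction dep with
  | nil => rfl
  | cons i rest ih =>
    by_cases h : (dget i "deprel" == "HED") = true
    · simp [abstractLoopA, h, List.findIdx?_cons, abstractLoopA_true]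
    · simp only [abstractLoopA, h, if_false, ih, Bool.false_eq_true, List.findIdx?_cons]
      cases hr : rest.findIdx? (fun t => dget t "deprel" == "HED") with
      | none => simp
      | some j => simp

-- ===== VERDICT (by name: the statement is the Claim_ definition above) =====
theorem abstract_v1_spec : Claim_equal_abstract_v1 := by
  intro dep _ _
  unfold Spec_abstract_v1 abstract_v1 abstract_v1_alt
  rw [abstractLoopA_false]
  cases hr : dep.findIdx? (fun t => dget t "deprel" == "HED") with
  | none => rfl
  | some i => rfl
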